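-- pv_equiv track=rewrite | github.com/Dhruv1240/python-modulizer- | modulizer.py | _merge_future_imports
-- ===== SOURCE A (Python) =====
-- from typing import Any, Dict, List, Optional, Sequence, Set, Tuple
--
-- def _merge_future_imports(chunks: List[str]) -> List[str]:
--     seen: Set[str] = set()
--     out: List[str] = []
--     for ch in chunks:
--         if ch not in seen:
--             seen.add(ch)
--             out.append(ch)
--     return sorted(out)
-- ===== SOURCE B (Python) =====
-- def _merge_future_imports(chunks):
--     s = sorted(chunks)
--     if not s:
--         return []
--     prev = s[0]
--     out = [prev]
--     for ch in s[1:]: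
--         if ch != prev:
--             out.append(ch)
--             prev = ch
--     return out
-- ===== Notes on version B (the rewrite author's own statement) =====
-- stated objective: alternative
-- what changed: B sorts the input first and removes duplicates in one adjacency pass over the sorted list, instead of A's hash-set first-occurrence dedup followed by a sort.
import Mathlib
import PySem

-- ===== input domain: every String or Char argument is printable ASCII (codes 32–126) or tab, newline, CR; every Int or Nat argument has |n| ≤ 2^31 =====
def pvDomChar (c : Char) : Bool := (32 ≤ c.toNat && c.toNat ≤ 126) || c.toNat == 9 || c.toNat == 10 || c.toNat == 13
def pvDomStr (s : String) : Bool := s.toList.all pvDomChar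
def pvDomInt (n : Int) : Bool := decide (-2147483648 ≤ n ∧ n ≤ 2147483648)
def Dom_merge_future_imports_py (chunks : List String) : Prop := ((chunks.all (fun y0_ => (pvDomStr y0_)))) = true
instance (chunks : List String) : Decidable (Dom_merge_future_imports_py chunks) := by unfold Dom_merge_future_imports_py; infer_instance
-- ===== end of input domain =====

-- B replaces A's hash-set first-occurrence dedup + final sort with sort-first and a single
-- adjacency pass over the sorted list (objective: alternative, same asymptotic cost).

-- ===== PORT A =====
-- for ch in chunks: if ch not in seen: seen.add(ch); out.append(ch) — then sorted(out)
def merge_future_imports_py (chunks : List String) : List String :=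
  let st := chunks.foldl
    (fun (st : PySem.Set String × List String) ch =>
      if PySem.Set.contains st.1 ch then st else (PySem.Set.add st.1 ch, st.2 ++ [ch]))
    (PySem.Set.empty, [])
  PySem.List.sorted st.2 (fun x => x) false

-- ===== PORT B =====
-- the loop 'for ch in s[1:]: if ch != prev: out.append(ch); prev = ch' as structural recursion
def pvAdjGo (prev : String) : List String → List String
  | [] => []
  | y :: t => if y = prev then pvAdjGo prev t else y :: pvAdjGo y t

def merge_future_imports_py_alt (chunks : List String) : List String :=
  match PySem.List.sorted chunks (fun x => x) false with
  | [] => []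
  | m :: t => m :: pvAdjGo m t

-- ===== PRECONDITION & SPEC =====
def Spec_merge_future_imports_py (chunks : List String) (out : List String) : Prop := out = merge_future_imports_py_alt chunks
instance (chunks : List String) (out : List String) : Decidable (Spec_merge_future_imports_py chunks out) := by unfold Spec_merge_future_imports_py; infer_instance

-- ===== CLAIM (what is proved, stated in full; the proofs are below) =====
def Claim_equal_merge_future_imports_py : Prop := ∀ (chunks : List String), Dom_merge_future_imports_py chunks → Spec_merge_future_imports_py chunks (merge_future_imports_py chunks)

-- ===== LEMMAS AND PROOFS =====

-- A's loop keeps exactly the elements seen (= out) plus every new element of chunks, without duplicates.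
theorem pvLoopA_spec (chunks : List String) :
    ∀ (seen : PySem.Set String) (out : List String),
      (∀ x, PySem.Set.contains seen x = true ↔ x ∈ out) → out.Nodup →
      (∀ x, x ∈ (chunks.foldl
          (fun (st : PySem.Set String × List String) ch =>
            if PySem.Set.contains st.1 ch then st else (PySem.Set.add st.1 ch, st.2 ++ [ch]))
          (seen, out)).2 ↔ x ∈ out ∨ x ∈ chunks) ∧
      (chunks.foldl
          (fun (st : PySem.Set String × List String) ch =>
            if PySem.Set.contains st.1 ch then st else (PySem.Set.add st.1 ch, st.2 ++ [ch]))
          (seen, out)).2.Nodup := by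
  induction chunks with
  | nil => intro seen out hinv hnd; simpa using hnd
  | cons ch rest ih =>
    intro seen out hinv hnd
    simp only [List.foldl_cons]
    by_cases h : PySem.Set.contains seen ch = true
    · simp only [h, if_pos]
      obtain ⟨hm, hn⟩ := ih seen out hinv hnd
      refine ⟨fun x => ?_, hn⟩
      rw [hm]
      have hch : ch ∈ out := (hinv ch).mp h
      constructor
      · rintro (hx | hx) <;> simp_all
      · rintro (hx | hx)
        · exact Or.inl hx
        · rcases List.mem_cons.mp hx with hx | hx
          · exact Or.inl (hx ▸ hch)
          · exact Or.inr hx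
    · simp only [h, if_neg, Bool.false_eq_true, not_false_iff]
      have hch : ch ∉ out := fun hc => h ((hinv ch).mpr hc)
      have hinv' : ∀ x, PySem.Set.contains (PySem.Set.add seen ch) x = true ↔ x ∈ out ++ [ch] := by
        intro x
        rw [PySem.Set.contains_iff, PySem.Set.mem_add]
        simp only [List.mem_append, List.mem_singleton]
        rw [← PySem.Set.contains_iff, hinv]
      have hnd' : (out ++ [ch]).Nodup := by
        simp only [List.nodup_append, List.nodup_singleton, hnd, true_and]
        intro a ha b hb
        rw [List.mem_singleton] at hb
        subst hb
        intro he
        exact hch (he ▸ ha)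
      obtain ⟨hm, hn⟩ := ih (PySem.Set.add seen ch) (out ++ [ch]) hinv' hnd'
      refine ⟨fun x => ?_, hn⟩
      rw [hm]
      simp only [List.mem_append, List.mem_cons]
      tauto

-- the adjacency pass on a sorted tail: membership and strict increase
theorem pvAdjGo_spec (l : List String) :
    ∀ (prev : String), l.Pairwise (· ≤ ·) → (∀ x ∈ l, prev ≤ x) →
      (∀ x, x ∈ pvAdjGo prev l ↔ (x ∈ l ∧ x ≠ prev)) ∧
      (prev :: pvAdjGo prev l).Pairwise (· < ·) := by
  induction l with
  | nil => intro prev _ _; simp [pvAdjGo]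
  | cons y t ih =>
    intro prev hs hp
    have hyt : ∀ x ∈ t, y ≤ x := fun x hx => (List.pairwise_cons.mp hs).1 x hx
    have hts : t.Pairwise (· ≤ ·) := (List.pairwise_cons.mp hs).2
    have hpy : prev ≤ y := hp y (List.mem_cons_self ..)
    by_cases h : y = prev
    · obtain ⟨hm, hpw⟩ := ih prev hts (fun x hx => le_trans hpy (hyt x hx))
      rw [pvAdjGo, if_pos h]
      refine ⟨fun x => ?_, hpw⟩
      rw [hm]
      subst h
      simp only [List.mem_cons]
      tauto
    · have hlt : prev < y := lt_of_le_of_ne hpy (fun he => h he.symm)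
      obtain ⟨hm, hpw⟩ := ih y hts hyt
      rw [pvAdjGo, if_neg h]
      constructor
      · intro x
        simp only [List.mem_cons, hm]
        constructor
        · rintro (rfl | ⟨hx, _⟩)
          · exact ⟨Or.inl rfl, h⟩
          · refine ⟨Or.inr hx, ?_⟩
            exact ne_of_gt (lt_of_lt_of_le hlt (hyt x hx))
        · rintro ⟨(rfl | hx), hne⟩
          · exact Or.inl rfl
          · by_cases hxy : x = y
            · exact Or.inl hxy
            · exact Or.inr ⟨hx, hxy⟩
      · refine List.pairwise_cons.mpr ⟨?_, hpw⟩
        intro x hx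
        rcases List.mem_cons.mp hx with rfl | hx
        · exact hlt
        · have := ((hm x).mp hx).1
          exact lt_of_lt_of_le hlt (hyt x this)

-- ===== VERDICT (by name: the statement is the Claim_ definition above) =====
theorem merge_future_imports_py_spec : Claim_equal_merge_future_imports_py := by
  intro chunks _
  unfold Spec_merge_future_imports_py merge_future_imports_py merge_future_imports_py_alt
  obtain ⟨hm, hn⟩ := pvLoopA_spec chunks PySem.Set.empty []
    (by intro x; simp [PySem.Set.empty]) List.nodup_nil
  simp only [List.not_mem_nil, false_or] at hm
  rcases hsort : PySem.List.sorted chunks (fun x => x) false with _ | ⟨m, t⟩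
  · have hc : chunks = [] := (PySem.List.sorted_eq_nil_iff ..).mp hsort
    subst hc
    simp [PySem.List.sorted]
  · have hpw : (m :: t).Pairwise (fun a b => a ≤ b) := by
      have := PySem.List.sorted_pairwise chunks (fun x => x)
      rwa [hsort] at this
    have hts : t.Pairwise (· ≤ ·) := (List.pairwise_cons.mp hpw).2
    have hmt : ∀ x ∈ t, m ≤ x := (List.pairwise_cons.mp hpw).1
    obtain ⟨hadjm, hadjp⟩ := pvAdjGo_spec t m hts hmt
    -- membership of B's result = membership of chunks
    have hbm : ∀ x, x ∈ m :: pvAdjGo m t ↔ x ∈ chunks := by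
      intro x
      have hx : x ∈ chunks ↔ x ∈ m :: t := by
        rw [← PySem.List.mem_sorted chunks (fun y => y) false, hsort]
      rw [hx]
      simp only [List.mem_cons, hadjm]
      constructor
      · rintro (rfl | ⟨hx, _⟩) <;> tauto
      · rintro (rfl | hx)
        · exact Or.inl rfl
        · by_cases hxm : x = m
          · exact Or.inl hxm
          · exact Or.inr ⟨hx, hxm⟩
    have hbnd : (m :: pvAdjGo m t).Nodup := hadjp.imp (fun h => ne_of_lt h)
    have hperm : (m :: pvAdjGo m t).Perm
        ((chunks.foldl
          (fun (st : PySem.Set String × List String) ch =>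
            if PySem.Set.contains st.1 ch then st else (PySem.Set.add st.1 ch, st.2 ++ [ch]))
          (PySem.Set.empty, [])).2) := by
      refine (List.perm_ext_iff_of_nodup hbnd hn).mpr ?_
      intro x
      rw [hbm, hm]
    exact PySem.List.sorted_eq_of_perm_of_pairwise_lt _ _ _ hperm hadjp
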